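-- pv_equiv track=rewrite | github.com/eyallin/aoc2018 | day_06.py | calc_grid_distances
-- ===== SOURCE A (Python) =====
-- import itertools
--
-- def distance_from_point(coord, point):
--     return abs(point[0] - coord[0]) + abs(point[1] - coord[1])
--
-- def calc_grid_distances(points, grid_size):
--     grid = {}
--     for g in itertools.product(range(grid_size[0]), range(grid_size[1])):
--         distance_from_points = {i: distance_from_point(g, p) for i, p in enumerate(points)}
--         min_distance = min(distance_from_points.items(), key=lambda i: distance_from_points[i[0]])
--
--         if list(distance_from_points.values()).count(min_distance[1]) > 1:
--             min_distance = None, None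
--         grid[g] = min_distance[0]
--
--     return grid
-- ===== SOURCE B (Python) =====
-- def calc_grid_distances(points, grid_size):
--     # One fused streaming pass per cell (running min distance, first argmin index,
--     # count of the minimum) instead of building a distance dict, a keyed min() and
--     # a values().count() scan.
--     grid = {}
--     for x in range(grid_size[0]):
--         for y in range(grid_size[1]):
--             best = None  # (dist, first index, count of dist)
--             for i, p in enumerate(points):
--                 d = abs(p[0] - x) + abs(p[1] - y)
--                 if best is None or d < best[0]:
--                     best = (d, i, 1)
--                 elif d == best[0]:
--                     best = (best[0], best[1], best[2] + 1)
--             grid[(x, y)] = best[1] if best[2] == 1 else None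
--     return grid
-- ===== Notes on version B (the rewrite author's own statement) =====
-- stated objective: faster
-- what changed: Per grid cell, A builds a dict of all point distances, runs min() with a dict-lookup key over its items and then a values().count() scan; B replaces those three passes and the dict by one fused streaming pass keeping (running min distance, first argmin index, count of the minimum).
import Mathlib
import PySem

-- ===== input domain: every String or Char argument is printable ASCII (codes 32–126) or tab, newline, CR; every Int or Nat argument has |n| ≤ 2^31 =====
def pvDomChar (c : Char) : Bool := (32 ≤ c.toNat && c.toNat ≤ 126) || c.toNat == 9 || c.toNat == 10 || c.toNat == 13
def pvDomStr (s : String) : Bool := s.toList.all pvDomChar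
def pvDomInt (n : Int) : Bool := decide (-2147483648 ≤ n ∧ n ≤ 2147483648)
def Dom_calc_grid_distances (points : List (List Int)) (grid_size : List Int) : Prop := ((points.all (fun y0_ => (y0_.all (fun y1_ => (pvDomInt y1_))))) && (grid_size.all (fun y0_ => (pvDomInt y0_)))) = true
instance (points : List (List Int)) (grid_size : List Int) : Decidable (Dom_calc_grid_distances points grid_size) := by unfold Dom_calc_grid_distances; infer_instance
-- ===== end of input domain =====

-- B replaces A's per-cell dict + keyed min() + values().count() by one fused streaming
-- pass (running min distance, first argmin index, count of the minimum); measured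
-- constant-factor speed-up, same O(W*H*N) asymptotics.

-- ===== PORT A =====
def pvDistanceFromPoint (coord : Int × Int) (point : List Int) : Int :=
  |PySem.List.pyGetD point 0 0 - coord.1| + |PySem.List.pyGetD point 1 0 - coord.2|
  -- point[0]/point[1]: IndexError (points shorter than 2) is excluded by Pre_; default never read inside Pre_

-- one iteration of A's grid loop body: dict comprehension, min over items, count of the min
def pvCellA (points : List (List Int)) (g : Int × Int) : Option Int :=
  let dfp : PySem.Dict Int Int :=
    (PySem.List.enumerate points 0).foldl
      (fun d ip => d.insert ip.1 (pvDistanceFromPoint g ip.2)) PySem.Dict.empty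
  match PySem.List.min? dfp.items (fun it => dfp.getD it.1 0) with
  | none => none  -- Python raises ValueError here (points == []); excluded by Pre_
  | some md => if dfp.values.count md.2 > 1 then none else some md.1

def calc_grid_distances (points : List (List Int)) (grid_size : List Int) : List (List Int × Option Int) :=
  ((PySem.List.pyRange 0 (PySem.List.pyGetD grid_size 0 0) 1).foldl (fun grid x =>
      (PySem.List.pyRange 0 (PySem.List.pyGetD grid_size 1 0) 1).foldl (fun grid y =>
        grid.insert [x, y] (pvCellA points (x, y))) grid)
    (PySem.Dict.empty : PySem.Dict (List Int) (Option Int))).items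

-- ===== PORT B =====
-- one update of B's running (min distance, first argmin index, count) triple
def pvStep (best : Option (Int × Int × Int)) (i : Int) (d : Int) : Option (Int × Int × Int) :=
  match best with
  | none => some (d, i, 1)
  | some (bd, bi, bc) =>
    if d < bd then some (d, i, 1)
    else if d = bd then some (bd, bi, bc + 1)
    else some (bd, bi, bc)

def pvCellB (points : List (List Int)) (x y : Int) : Option Int :=
  match (PySem.List.enumerate points 0).foldl
      (fun best ip =>
        pvStep best ip.1 (|PySem.List.pyGetD ip.2 0 0 - x| + |PySem.List.pyGetD ip.2 1 0 - y|)) none with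
  | none => none  -- Python B raises here (points == []); excluded by Pre_
  | some (_, bi, bc) => if bc = 1 then some bi else none

def calc_grid_distances_alt (points : List (List Int)) (grid_size : List Int) : List (List Int × Option Int) :=
  ((PySem.List.pyRange 0 (PySem.List.pyGetD grid_size 0 0) 1).foldl (fun grid x =>
      (PySem.List.pyRange 0 (PySem.List.pyGetD grid_size 1 0) 1).foldl (fun grid y =>
        grid.insert [x, y] (pvCellB points x y)) grid)
    (PySem.Dict.empty : PySem.Dict (List Int) (Option Int))).items

-- ===== PRECONDITION & SPEC =====
-- Pre_ excludes exactly the inputs on which A raises: grid_size shorter than 2 (IndexError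
-- building the ranges), and — when the grid is nonempty — an empty points list (ValueError
-- from min()) or a point shorter than 2 (IndexError in distance_from_point).
def Pre_calc_grid_distances (points : List (List Int)) (grid_size : List Int) : Prop :=
  2 ≤ grid_size.length ∧
  ((0 < PySem.List.pyGetD grid_size 0 0 ∧ 0 < PySem.List.pyGetD grid_size 1 0) →
    points ≠ [] ∧ ∀ p ∈ points, 2 ≤ p.length)
instance (points : List (List Int)) (grid_size : List Int) : Decidable (Pre_calc_grid_distances points grid_size) := by unfold Pre_calc_grid_distances; infer_instance

def pvWitness_calc_grid_distances : List (List Int) × List Int := ([[0, 0], [2, 3]], [3, 3])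

def Spec_calc_grid_distances (points : List (List Int)) (grid_size : List Int) (out : List (List Int × Option Int)) : Prop := out = calc_grid_distances_alt points grid_size
instance (points : List (List Int)) (grid_size : List Int) (out : List (List Int × Option Int)) : Decidable (Spec_calc_grid_distances points grid_size out) := by unfold Spec_calc_grid_distances; infer_instance

-- ===== CLAIM (what is proved, stated in full; the proofs are below) =====
def Claim_equal_calc_grid_distances : Prop := ∀ (points : List (List Int)) (grid_size : List Int), Dom_calc_grid_distances points grid_size → Pre_calc_grid_distances points grid_size → Spec_calc_grid_distances points grid_size (calc_grid_distances points grid_size)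

-- ===== LEMMAS AND PROOFS =====

-- pairwise running minimum on (index, distance) pairs, keeping the earlier pair on ties
def pvPMin (m x : Int × Int) : Int × Int := if x.2 < m.2 then x else m

theorem pv_fold_min_le (t : List (Int × Int)) (m : Int × Int) :
    (t.foldl pvPMin m).2 ≤ m.2 := by
  induction t generalizing m with
  | nil => simp
  | cons x t ih =>
    simp only [List.foldl_cons, pvPMin]
    split
    · exact le_of_lt (lt_of_le_of_lt (ih x) (by assumption))
    · exact ih m

theorem pv_fold_min_mem (t : List (Int × Int)) (m : Int × Int) :
    t.foldl pvPMin m = m ∨ t.foldl pvPMin m ∈ t := by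
  induction t generalizing m with
  | nil => left; rfl
  | cons x t ih =>
    simp only [List.foldl_cons, pvPMin, List.mem_cons]
    split
    · rcases ih x with h | h
      · right; left; exact h
      · right; right; exact h
    · rcases ih m with h | h
      · left; exact h
      · right; right; exact h

-- min? as a foldl of a named step function
def pvMinStep (k : Int × Int → Int) (acc : Option (Int × Int)) (x : Int × Int) : Option (Int × Int) :=
  match acc with
  | none => some x
  | some m => if k x < k m then some x else some m

theorem pv_min?_eq_foldl (xs : List (Int × Int)) (k : Int × Int → Int) :
    PySem.List.min? xs k = xs.foldl (pvMinStep k) none := by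
  simp only [PySem.List.min?]
  congr 1
  funext acc x
  cases acc <;> rfl

-- min?'s foldl only ever compares members (and the seed); keys agreeing on members give the same min?
theorem pv_foldl_min_congr (xs : List (Int × Int)) (k1 k2 : Int × Int → Int) (acc : Option (Int × Int))
    (hxs : ∀ x ∈ xs, k1 x = k2 x) (hacc : ∀ a, acc = some a → k1 a = k2 a) :
    xs.foldl (pvMinStep k1) acc = xs.foldl (pvMinStep k2) acc := by
  induction xs generalizing acc with
  | nil => rfl
  | cons x t ih =>
    have hx : k1 x = k2 x := hxs x (List.mem_cons_self)
    have hxs' : ∀ y ∈ t, k1 y = k2 y := fun y hy => hxs y (List.mem_cons_of_mem _ hy)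
    cases acc with
    | none =>
      simp only [List.foldl_cons, pvMinStep]
      exact ih (some x) hxs' (by intro a h; cases h; exact hx)
    | some m =>
      have hm : k1 m = k2 m := hacc m rfl
      simp only [List.foldl_cons, pvMinStep, hx, hm]
      split
      · exact ih (some x) hxs' (by intro a h; cases h; exact hx)
      · exact ih (some m) hxs' (by intro a h; cases h; exact hm)

theorem pv_min?_congr (xs : List (Int × Int)) (k1 k2 : Int × Int → Int)
    (hxs : ∀ x ∈ xs, k1 x = k2 x) :
    PySem.List.min? xs k1 = PySem.List.min? xs k2 := by
  rw [pv_min?_eq_foldl, pv_min?_eq_foldl]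
  exact pv_foldl_min_congr xs k1 k2 none hxs (by intro a h; cases h)

theorem pv_min?_cons (t : List (Int × Int)) (p0 : Int × Int) :
    PySem.List.min? (p0 :: t) (fun it => it.2) = some (t.foldl pvPMin p0) := by
  induction t generalizing p0 with
  | nil => rfl
  | cons x t ih =>
    have h : PySem.List.min? (p0 :: x :: t) (fun it => it.2)
        = PySem.List.min? (pvPMin p0 x :: t) (fun it => it.2) := by
      rw [pv_min?_eq_foldl, pv_min?_eq_foldl]
      simp only [List.foldl_cons, pvMinStep, pvPMin]
      split <;> rfl
    rw [h, ih, List.foldl_cons]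

-- the core invariant: B's single pass computes (min, first argmin, count of the min)
theorem pv_core (q : List (Int × Int)) (m : Int × Int) (c : Int) :
    q.foldl (fun best pr => pvStep best pr.1 pr.2) (some (m.2, m.1, c))
    = some ((q.foldl pvPMin m).2, (q.foldl pvPMin m).1,
        (if (q.foldl pvPMin m).2 = m.2 then c else 0) + ((q.map (·.2)).count (q.foldl pvPMin m).2 : Int)) := by
  induction q generalizing m c with
  | nil => simp
  | cons x t ih =>
    have hle : (t.foldl pvPMin (pvPMin m x)).2 ≤ (pvPMin m x).2 := pv_fold_min_le t _
    rw [List.foldl_cons, List.map_cons]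
    rcases lt_trichotomy x.2 m.2 with hlt | heq | hgt
    · have hpm : pvPMin m x = x := by simp [pvPMin, hlt]
      have hstep : pvStep (some (m.2, m.1, c)) x.1 x.2 = some (x.2, x.1, 1) := by
        simp [pvStep, hlt]
      rw [hpm] at hle
      rw [List.foldl_cons, hpm, hstep, ih x 1]
      simp only [Option.some.injEq, Prod.mk.injEq, List.count_cons, beq_iff_eq]
      refine ⟨by first | rfl | trivial, by first | rfl | trivial, ?_⟩
      split_ifs <;> push_cast <;> omega
    · have hnlt : ¬ x.2 < m.2 := by omega
      have hpm : pvPMin m x = m := by simp [pvPMin, hnlt]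
      have hstep : pvStep (some (m.2, m.1, c)) x.1 x.2 = some (m.2, m.1, c + 1) := by
        simp [pvStep, heq]
      rw [List.foldl_cons, hpm, hstep, ih m (c + 1)]
      simp only [Option.some.injEq, Prod.mk.injEq, List.count_cons, beq_iff_eq]
      refine ⟨by first | rfl | trivial, by first | rfl | trivial, ?_⟩
      split_ifs <;> push_cast <;> omega
    · have hnlt : ¬ x.2 < m.2 := by omega
      have hne : ¬ x.2 = m.2 := by omega
      have hpm : pvPMin m x = m := by simp [pvPMin, hnlt]
      have hstep : pvStep (some (m.2, m.1, c)) x.1 x.2 = some (m.2, m.1, c) := by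
        simp [pvStep, hnlt, hne]
      rw [hpm] at hle
      rw [List.foldl_cons, hpm, hstep, ih m c]
      simp only [Option.some.injEq, Prod.mk.injEq, List.count_cons, beq_iff_eq]
      refine ⟨by first | rfl | trivial, by first | rfl | trivial, ?_⟩
      split_ifs <;> push_cast <;> omega

-- A's per-cell value equals B's per-cell value
theorem pv_cell_eq (points : List (List Int)) (x y : Int) :
    pvCellA points (x, y) = pvCellB points x y := by
  simp only [pvCellA, pvCellB]
  -- the distance list, paired with the indices
  set q : List (Int × Int) :=
    (PySem.List.enumerate points 0).map (fun ip => (ip.1, pvDistanceFromPoint (x, y) ip.2)) with hq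
  set dfp : PySem.Dict Int Int :=
    (PySem.List.enumerate points 0).foldl
      (fun d ip => d.insert ip.1 (pvDistanceFromPoint (x, y) ip.2)) PySem.Dict.empty with hdfp
  have hfresh : ∀ ip ∈ PySem.List.enumerate points 0,
      (PySem.Dict.empty : PySem.Dict Int Int).contains ip.1 = false := by
    intro ip _; simp [PySem.Dict.contains_empty]
  have hnodup : ((PySem.List.enumerate points 0).map (·.1)).Nodup := by
    rw [PySem.List.map_fst_enumerate]
    exact PySem.List.nodup_pyRange_one 0 (0 + points.length)
  have hitems : dfp.items = q := by
    rw [hdfp, PySem.Dict.items_foldl_insert_fresh _ _ _ _ hfresh hnodup, hq]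
    rfl
  have hkeys : dfp.keys.Nodup := by
    rw [hdfp]
    exact PySem.Dict.nodup_keys_foldl_insert_key _ _ _ _ PySem.Dict.nodup_keys_empty
  have hgetD : ∀ it ∈ q, dfp.getD it.1 0 = it.2 := by
    intro it hit
    have hmem : (it.1, it.2) ∈ dfp.items := by rw [hitems]; exact hit
    exact PySem.Dict.getD_of_mem_items dfp hmem hkeys 0
  have hmin : PySem.List.min? dfp.items (fun it => dfp.getD it.1 0) = PySem.List.min? q (fun it => it.2) := by
    rw [hitems]
    exact pv_min?_congr q _ _ hgetD
  have hvalues : dfp.values = q.map (·.2) := by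
    simp only [PySem.Dict.values]; rw [hitems]
  -- B's fold over enumerate as a fold over q
  have hBfold :
      (PySem.List.enumerate points 0).foldl
        (fun best ip =>
          pvStep best ip.1 (|PySem.List.pyGetD ip.2 0 0 - x| + |PySem.List.pyGetD ip.2 1 0 - y|)) none
      = q.foldl (fun best pr => pvStep best pr.1 pr.2) none := by
    rw [hq, List.foldl_map]
    rfl
  rw [hmin, hvalues, hBfold]
  cases q with
  | nil => simp [PySem.List.min?]
  | cons p0 t =>
    have hminq : PySem.List.min? (p0 :: t) (fun it => it.2) = some (t.foldl pvPMin p0) :=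
      pv_min?_cons t p0
    rw [hminq, List.foldl_cons]
    have hstep : pvStep none p0.1 p0.2 = some (p0.2, p0.1, 1) := rfl
    rw [hstep, pv_core t p0 1]
    set M := t.foldl pvPMin p0 with hM
    have hc : (if M.2 = p0.2 then (1 : Int) else 0) + ((t.map (·.2)).count M.2 : Int)
        = (((p0 :: t).map (·.2)).count M.2 : Int) := by
      rw [List.map_cons, List.count_cons]
      by_cases h : M.2 = p0.2 <;> simp [h, beq_iff_eq] <;> omega
    rw [hc]
    dsimp only
    have hpos : 0 < ((p0 :: t).map (·.2)).count M.2 := by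
      apply List.count_pos_iff.2
      rcases pv_fold_min_mem t p0 with h | h
      · rw [hM, h]; simp
      · rw [List.map_cons]
        exact List.mem_cons_of_mem _ (List.mem_map_of_mem (by rw [hM]; exact h))
    set n := ((p0 :: t).map (·.2)).count M.2 with hn
    by_cases h1 : n = 1
    · have hng : ¬ n > 1 := by omega
      rw [if_neg hng, h1]
      norm_num
    · have h2 : n > 1 := by omega
      have h3 : ¬ ((n : Int) = 1) := by exact_mod_cast h1
      rw [if_pos h2, if_neg h3]

-- ===== VERDICT (by name: the statement is the Claim_ definition above) =====
theorem calc_grid_distances_spec : Claim_equal_calc_grid_distances := by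
  intro points grid_size _ _
  unfold Spec_calc_grid_distances calc_grid_distances calc_grid_distances_alt
  simp only [pv_cell_eq]
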